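-- pv_equiv track=rewrite | github.com/eriknyquist/bfi | bfi/__init__.py | _count_dupes_ahead
-- ===== SOURCE A (Python) =====
-- def _count_dupes_ahead(string, index):
--     """
--     Counts the number of repeated characters in 'string', starting at 'index'
--     """
--
--     ret = 0
--     i = index
--     end = len(string) - 1
--
--     while (i < end) and (string[i + 1] == string[i]):
--         i += 1
--         ret += 1
--
--     return ret
-- ===== SOURCE B (Python) =====
-- def _count_dupes_ahead(string, index):
--     """
--     Counts the number of repeated characters in 'string', starting at 'index'
--     """
--
--     ahead = string[index:]
--     shifted = string[index + 1:]
--     return next((k for k, pair in enumerate(zip(ahead, shifted)) if pair[0] != pair[1]),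
--                 min(len(ahead), len(shifted)))
-- ===== Notes on version B (the rewrite author's own statement) =====
-- stated objective: alternative
-- what changed: Replaces A's while-loop with ret/i/end counter bookkeeping by a slice-and-pair formulation: pair string[index:] with string[index+1:] and return the position of the first mismatching adjacent pair (next over an enumerate generator), defaulting to the number of pairs.
-- outside the precondition, e.g. on _count_dupes_ahead('aa', -1): A returns 2, B returns 1; on _count_dupes_ahead('a', -2): A raises IndexError, B returns 1
import Mathlib
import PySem

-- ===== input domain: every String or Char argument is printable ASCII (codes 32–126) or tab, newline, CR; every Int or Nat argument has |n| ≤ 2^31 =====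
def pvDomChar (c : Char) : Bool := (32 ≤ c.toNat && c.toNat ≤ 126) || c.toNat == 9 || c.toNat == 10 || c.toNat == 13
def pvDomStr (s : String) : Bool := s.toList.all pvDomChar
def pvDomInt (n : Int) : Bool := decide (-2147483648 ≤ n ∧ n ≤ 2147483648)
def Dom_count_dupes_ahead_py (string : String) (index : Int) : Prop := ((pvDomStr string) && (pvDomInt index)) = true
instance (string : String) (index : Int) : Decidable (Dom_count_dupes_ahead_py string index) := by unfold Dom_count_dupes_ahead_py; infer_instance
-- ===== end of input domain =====

-- ===== PORT A =====
-- B replaces A's while-loop with index/end bookkeeping by a slice-and-pair scan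
-- (first mismatching adjacent pair via zip/enumerate/next); objective: alternative
-- decomposition, not claimed faster.

-- A: ret/i/end bookkeeping; the while guard `(i < end) and (string[i+1] == string[i])`
-- becomes the dite condition (pyGet? = none exactly where Python raises; Pre_ excludes those).
def count_dupes_ahead_loop (s : List Char) (endI i ret : Int) : Int :=
  if _h : i < endI ∧ PySem.List.pyGet? s (i + 1) = PySem.List.pyGet? s i
           ∧ (PySem.List.pyGet? s i).isSome = true then
    count_dupes_ahead_loop s endI (i + 1) (ret + 1)
  else ret
termination_by (endI - i).toNat
decreasing_by omega

def count_dupes_ahead_py (string : String) (index : Int) : Int :=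
  count_dupes_ahead_loop string.toList ((string.toList.length : Int) - 1) index 0

-- ===== PORT B =====
-- core of Source B on the character list: ahead = string[index:], shifted = string[index+1:],
-- first index k with ahead[k] != shifted[k] (next over the enumerate generator = findIdx?),
-- default min(len(ahead), len(shifted)).
def count_dupes_ahead_core (s : List Char) (index : Int) : Int :=
  let ahead := PySem.List.slice s (some index) none
  let shifted := PySem.List.slice s (some (index + 1)) none
  match (ahead.zip shifted).findIdx? (fun pair => pair.1 != pair.2) with
  | some k => (k : Int)
  | none => ((min ahead.length shifted.length : Nat) : Int)

def count_dupes_ahead_py_alt (string : String) (index : Int) : Int :=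
  count_dupes_ahead_core string.toList index

-- ===== PRECONDITION & SPEC =====
-- Pre_ excludes negative indices: there A raises IndexError for index < -len(string) and
-- otherwise reads through Python's negative-index wraparound (comparing the last character
-- with earlier ones) while the slice-based B reads a clamped suffix -- an unspecified corner
-- of this internal helper, whose callers pass non-negative positions.
def Pre_count_dupes_ahead_py (string : String) (index : Int) : Prop := 0 ≤ index
instance (string : String) (index : Int) : Decidable (Pre_count_dupes_ahead_py string index) := by
  unfold Pre_count_dupes_ahead_py; infer_instance

def pvWitness_count_dupes_ahead_py : String × Int := ("aab", 0)

def Spec_count_dupes_ahead_py (string : String) (index : Int) (out : Int) : Prop := out = count_dupes_ahead_py_alt string index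
instance (string : String) (index : Int) (out : Int) : Decidable (Spec_count_dupes_ahead_py string index out) := by unfold Spec_count_dupes_ahead_py; infer_instance

-- ===== CLAIM (what is proved, stated in full; the proofs are below) =====
def Claim_equal_count_dupes_ahead_py : Prop := ∀ (string : String) (index : Int), Dom_count_dupes_ahead_py string index → Pre_count_dupes_ahead_py string index → Spec_count_dupes_ahead_py string index (count_dupes_ahead_py string index)

-- ===== LEMMAS AND PROOFS =====

lemma core_zero_of_ge (s : List Char) (i : Int) (h0 : 0 ≤ i)
    (hge : (s.length : Int) - 1 ≤ i) : count_dupes_ahead_core s i = 0 := by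
  obtain ⟨j, rfl⟩ : ∃ j : Nat, i = (j : Int) := ⟨i.toNat, (Int.toNat_of_nonneg h0).symm⟩
  unfold count_dupes_ahead_core
  have h1 : ((j : Int) + 1) = (((j + 1 : Nat)) : Int) := by push_cast; ring
  rw [h1, PySem.List.slice_from_natCast, PySem.List.slice_from_natCast]
  have hd : s.drop (j + 1) = [] := List.drop_eq_nil_of_le (by omega)
  simp [hd]

lemma core_zero_of_ne (s : List Char) (i : Int) (h0 : 0 ≤ i)
    (hlt : i < (s.length : Int) - 1)
    (hne : PySem.List.pyGet? s (i + 1) ≠ PySem.List.pyGet? s i) :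
    count_dupes_ahead_core s i = 0 := by
  obtain ⟨j, rfl⟩ : ∃ j : Nat, i = (j : Int) := ⟨i.toNat, (Int.toNat_of_nonneg h0).symm⟩
  have hj1 : j + 1 < s.length := by omega
  have hcne : s[j + 1]'hj1 ≠ s[j]'(by omega) := by
    intro hc
    apply hne
    have h1 : ((j : Int) + 1) = (((j + 1 : Nat)) : Int) := by push_cast; ring
    rw [h1, PySem.List.pyGet?_natCast, PySem.List.pyGet?_natCast,
      List.getElem?_eq_getElem hj1, List.getElem?_eq_getElem (by omega), hc]
  unfold count_dupes_ahead_core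
  have h1 : ((j : Int) + 1) = (((j + 1 : Nat)) : Int) := by push_cast; ring
  rw [h1, PySem.List.slice_from_natCast, PySem.List.slice_from_natCast]
  dsimp only
  rw [List.drop_eq_getElem_cons (show j < s.length by omega),
    List.drop_eq_getElem_cons hj1, List.zip_cons_cons, List.findIdx?_cons]
  have hs : s[j]'(by omega) ≠ s[j + 1]'hj1 := fun h => hcne h.symm
  simp [hs]

lemma core_step (s : List Char) (i : Int) (h0 : 0 ≤ i)
    (hlt : i < (s.length : Int) - 1)
    (heq : PySem.List.pyGet? s (i + 1) = PySem.List.pyGet? s i) :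
    count_dupes_ahead_core s i = 1 + count_dupes_ahead_core s (i + 1) := by
  obtain ⟨j, rfl⟩ : ∃ j : Nat, i = (j : Int) := ⟨i.toNat, (Int.toNat_of_nonneg h0).symm⟩
  have hj1 : j + 1 < s.length := by omega
  have hceq : s[j + 1]'hj1 = s[j]'(by omega) := by
    have h1 : ((j : Int) + 1) = (((j + 1 : Nat)) : Int) := by push_cast; ring
    rw [h1, PySem.List.pyGet?_natCast, PySem.List.pyGet?_natCast,
      List.getElem?_eq_getElem hj1, List.getElem?_eq_getElem (by omega)] at heq
    exact Option.some.inj heq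
  unfold count_dupes_ahead_core
  have h1 : ((j : Int) + 1) = (((j + 1 : Nat)) : Int) := by push_cast; ring
  have h2 : (((j + 1 : Nat) : Int) + 1) = (((j + 2 : Nat)) : Int) := by push_cast; ring
  rw [h1, h2, PySem.List.slice_from_natCast, PySem.List.slice_from_natCast,
    PySem.List.slice_from_natCast]
  dsimp only
  rw [List.drop_eq_getElem_cons (show j < s.length by omega)]
  conv_lhs => rw [List.drop_eq_getElem_cons hj1]
  rw [List.zip_cons_cons, List.findIdx?_cons,
    if_neg (by simp [hceq]), show j + 1 + 1 = j + 2 from rfl,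
    ← List.drop_eq_getElem_cons hj1]
  rcases hidx : List.findIdx? (fun pair => pair.1 != pair.2)
      ((s.drop (j + 1)).zip (s.drop (j + 2))) with _ | k
  · simp only [Option.map_none, List.length_cons, List.length_drop]
    push_cast
    omega
  · simp only [Option.map_some]
    push_cast
    ring

lemma loop_eq_core (s : List Char) (N : Nat) :
    ∀ (i ret : Int), 0 ≤ i → ((s.length : Int) - 1 - i).toNat ≤ N →
    count_dupes_ahead_loop s ((s.length : Int) - 1) i ret = ret + count_dupes_ahead_core s i := by
  induction N with
  | zero =>
    intro i ret h0 hN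
    have hge : (s.length : Int) - 1 ≤ i := by omega
    rw [count_dupes_ahead_loop, dif_neg (by intro h; omega), core_zero_of_ge s i h0 hge]
    ring
  | succ N ih =>
    intro i ret h0 hN
    by_cases hlt : i < (s.length : Int) - 1
    · by_cases heq : PySem.List.pyGet? s (i + 1) = PySem.List.pyGet? s i
      · have hsome : (PySem.List.pyGet? s i).isSome = true := by
          rw [PySem.List.pyGet?_eq_some_getElem s h0 (by omega)]
          rfl
        rw [count_dupes_ahead_loop, dif_pos ⟨hlt, heq, hsome⟩,
          ih (i + 1) (ret + 1) (by omega) (by omega), core_step s i h0 hlt heq]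
        ring
      · rw [count_dupes_ahead_loop, dif_neg (by intro h; exact heq h.2.1),
          core_zero_of_ne s i h0 hlt heq]
        ring
    · rw [count_dupes_ahead_loop, dif_neg (by intro h; exact hlt h.1),
        core_zero_of_ge s i h0 (by omega)]
      ring

-- ===== VERDICT (by name: the statement is the Claim_ definition above) =====
theorem count_dupes_ahead_py_spec : Claim_equal_count_dupes_ahead_py := by
  intro string index _hdom hpre
  unfold Spec_count_dupes_ahead_py count_dupes_ahead_py count_dupes_ahead_py_alt
  rw [loop_eq_core string.toList ((string.toList.length : Int) - 1 - index).toNat index 0 hpre le_rfl]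
  ring
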